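-- pv_equiv track=rewrite | github.com/LBJLincoln/mon-ipad | db/populate/phase2_supabase.py | format_table_string
-- ===== SOURCE A (Python) =====
-- def format_table_string(rows):
--     """Convert a 2D array into a human-readable text table."""
--     if not rows:
--         return ""
--
--     col_widths = []
--     for row in rows:
--         for i, cell in enumerate(row):
--             cell_str = str(cell).strip()
--             while i >= len(col_widths):
--                 col_widths.append(0)
--             col_widths[i] = max(col_widths[i], len(cell_str))
--
--     col_widths = [min(w, 30) for w in col_widths]
--
--     lines = []
--     for row_idx, row in enumerate(rows):
--         cells = []
--         for i, cell in enumerate(row):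
--             cell_str = str(cell).strip()[:30]
--             if i < len(col_widths):
--                 cells.append(cell_str.ljust(col_widths[i]))
--             else:
--                 cells.append(cell_str)
--         lines.append(" | ".join(cells))
--         if row_idx == 0:
--             lines.append("-+-".join("-" * w for w in col_widths[:len(row)]))
--
--     return "\n".join(lines)
-- ===== SOURCE B (Python) =====
-- def format_table_string(rows):
--     """Convert a 2D array into a human-readable text table."""
--     if not rows:
--         return ""
--
--     # Build the table column by column: each column is stripped, truncated
--     # and padded as a whole; rows are then assembled by indexing into the
--     # ready-padded columns, so no per-row formatting pass is needed.
--     ncols = max(map(len, rows))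
--     widths = []
--     padded = []
--     for k in range(ncols):
--         col = [str(r[k]).strip()[:30] if k < len(r) else "" for r in rows]
--         w = min(max(len(c) for c in col), 30)
--         widths.append(w)
--         padded.append([c.ljust(w) for c in col])
--
--     head, *body = rows
--     sep = "-+-".join("-" * w for w in widths[:len(head)])
--
--     def line(i, row):
--         return " | ".join(padded[k][i] for k in range(len(row)))
--
--     return "\n".join([line(0, head), sep] +
--                      [line(i + 1, r) for i, r in enumerate(body)])
-- ===== Notes on version B (the rewrite author's own statement) =====
-- stated objective: alternative
-- what changed: B builds the table column by column: each column of cells is stripped/truncated and padded to its width as a whole, and the output rows are then assembled by indexing into the ready-padded columns, whereas A keeps a mutable widths list updated row-major and formats every cell again in a second row-wise pass.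
import Mathlib
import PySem

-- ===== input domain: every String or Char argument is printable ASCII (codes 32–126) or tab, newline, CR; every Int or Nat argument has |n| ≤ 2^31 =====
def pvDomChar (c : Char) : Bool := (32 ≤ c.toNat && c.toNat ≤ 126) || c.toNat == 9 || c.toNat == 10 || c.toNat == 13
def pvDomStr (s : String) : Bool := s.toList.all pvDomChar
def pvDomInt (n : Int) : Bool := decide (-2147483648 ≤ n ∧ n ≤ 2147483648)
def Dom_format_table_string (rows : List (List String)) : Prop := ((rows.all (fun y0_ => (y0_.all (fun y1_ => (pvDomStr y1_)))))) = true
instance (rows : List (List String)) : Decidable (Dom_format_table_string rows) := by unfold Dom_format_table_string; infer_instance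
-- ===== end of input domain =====

-- B builds the table column-major (each column stripped/truncated/padded as a whole,
-- rows assembled by indexing into the padded columns) instead of A's row-major widths
-- accumulation plus a second per-row formatting pass (objective: alternative).

-- shared primitive: s.ljust(w) on code points (Nat subtraction = no-op when already wide enough, as in Python)
def pyLjust (cs : List Char) (w : Nat) : List Char := cs ++ List.replicate (w - cs.length) ' '

-- ===== PORT A =====
-- inner loop: 'for i, cell in enumerate(row)' updating col_widths; the while-append of
-- single zeros is the same values as appending 'replicate (i+1 - len) 0' at once
def fts_rowWidths (ws : List Nat) (i : Nat) (row : List String) : List Nat :=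
  match row with
  | [] => ws
  | cell :: rest =>
      let n := (PySem.Chars.strip cell.toList).length
      let ws' := ws ++ List.replicate (i + 1 - ws.length) 0
      fts_rowWidths (ws'.set i (max (ws'.getD i 0) n)) (i + 1) rest

-- inner loop building 'cells' for one row ('cell_str[:30]' = take 30: bound is nonnegative)
def fts_rowCells (cw : List Nat) (i : Nat) (row : List String) : List (List Char) :=
  match row with
  | [] => []
  | cell :: rest =>
      let cs := (PySem.Chars.strip cell.toList).take 30
      (if i < cw.length then pyLjust cs (cw.getD i 0) else cs) :: fts_rowCells cw (i + 1) rest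

-- loop over 'enumerate(rows)' appending the joined line, plus the separator after row 0
def fts_lines (cw : List Nat) (idx : Nat) (rows : List (List String)) : List (List Char) :=
  match rows with
  | [] => []
  | row :: rest =>
      let line := PySem.Chars.join " | ".toList (fts_rowCells cw 0 row)
      let seps := if idx = 0 then
          [PySem.Chars.join "-+-".toList ((cw.take row.length).map (fun w => List.replicate w '-'))]
        else []
      line :: (seps ++ fts_lines cw (idx + 1) rest)

def format_table_string (rows : List (List String)) : String :=
  if rows = [] then "" else
    let colWidths := (rows.foldl (fun ws row => fts_rowWidths ws 0 row) []).map (fun w => min w 30)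
    String.ofList (PySem.Chars.join "\n".toList (fts_lines colWidths 0 rows))

-- ===== PORT B =====
-- ncols = max(map(len, rows))  (rows nonempty; fold from 0 equals that max on Nat lengths)
def ftsB_ncols (rows : List (List String)) : Nat := rows.foldl (fun m r => max m r.length) 0
-- column k: '[str(r[k]).strip()[:30] if k < len(r) else "" for r in rows]'
def ftsB_col (rows : List (List String)) (k : Nat) : List (List Char) :=
  rows.map (fun r => if k < r.length then (PySem.Chars.strip ((r.getD k "").toList)).take 30 else [])
-- the 'for k in range(ncols)' loop: (width, padded column) per column
def ftsB_padded (rows : List (List String)) : List (Nat × List (List Char)) :=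
  (List.range (ftsB_ncols rows)).map (fun k =>
    let col := ftsB_col rows k
    let w := min (col.foldl (fun m c => max m c.length) 0) 30
    (w, col.map (fun c => pyLjust c w)))
-- line(i, row): join the i-th entry of each of the first len(row) padded columns
def ftsB_line (padded : List (Nat × List (List Char))) (i rowLen : Nat) : List Char :=
  PySem.Chars.join " | ".toList
    ((List.range rowLen).map (fun k => ((padded.getD k (0, [])).2).getD i []))
-- '[line(i + 1, r) for i, r in enumerate(body)]'
def ftsB_body (padded : List (Nat × List (List Char))) : Nat → List (List String) → List (List Char)
  | _, [] => []
  | i, r :: rs => ftsB_line padded i r.length :: ftsB_body padded (i + 1) rs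

def format_table_string_alt (rows : List (List String)) : String :=
  match rows with
  | [] => ""
  | r0 :: rest =>
      let padded := ftsB_padded (r0 :: rest)
      let widths := padded.map Prod.fst
      let sep := PySem.Chars.join "-+-".toList ((widths.take r0.length).map (fun w => List.replicate w '-'))
      String.ofList (PySem.Chars.join "\n".toList
        (ftsB_line padded 0 r0.length :: sep :: ftsB_body padded 1 rest))

-- ===== PRECONDITION & SPEC =====
def Spec_format_table_string (rows : List (List String)) (out : String) : Prop := out = format_table_string_alt rows
instance (rows : List (List String)) (out : String) : Decidable (Spec_format_table_string rows out) := by unfold Spec_format_table_string; infer_instance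

-- ===== CLAIM (what is proved, stated in full; the proofs are below) =====
def Claim_equal_format_table_string : Prop := ∀ (rows : List (List String)), Dom_format_table_string rows → Spec_format_table_string rows (format_table_string rows)

-- ===== LEMMAS AND PROOFS =====

-- A's per-column maximum (uncapped), used as the common reference point
def ftsOld_colMax (rows : List (List String)) (k : Nat) : Nat :=
  rows.foldl (fun m r => max m (PySem.Chars.strip ((r.getD k "").toList)).length) 0
def ftsOld_widths (rows : List (List String)) : List Nat :=
  (List.range (ftsB_ncols rows)).map (fun k => min (ftsOld_colMax rows k) 30)

theorem fts_rowWidths_length (row : List String) (ws : List Nat) (i : Nat) :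
    (fts_rowWidths ws i row).length = if row = [] then ws.length else max ws.length (i + row.length) := by
  induction row generalizing ws i with
  | nil => simp [fts_rowWidths]
  | cons c rest ih =>
      simp only [fts_rowWidths, ih]
      split <;> rename_i h <;> simp_all [List.length_set] <;> omega

theorem fts_rowWidths_getD (row : List String) (ws : List Nat) (i j : Nat) :
    (fts_rowWidths ws i row).getD j 0
      = max (ws.getD j 0)
          (if i ≤ j then (PySem.Chars.strip ((row.getD (j - i) "").toList)).length else 0) := by
  induction row generalizing ws i with
  | nil => simp [fts_rowWidths, show PySem.Chars.strip ([] : List Char) = [] from rfl]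
  | cons c rest ih =>
      rw [fts_rowWidths, ih]
      have hpadD : ∀ k, ((ws ++ List.replicate (i + 1 - ws.length) 0).getD k 0) = ws.getD k 0 := by
        intro k
        simp only [List.getD, List.getElem?_append, List.getElem?_replicate]
        split
        · rfl
        · split <;> simp [List.getElem?_eq_none (by omega : ws.length ≤ k)]
      have hlen : i < (ws ++ List.replicate (i + 1 - ws.length) 0).length := by
        simp; omega
      have hsetD : ∀ (l : List Nat) (k v : Nat), k < l.length →
          (l.set k v).getD j 0 = if j = k then v else l.getD j 0 := by
        intro l k v hk
        by_cases hjk : j = k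
        · subst hjk; simp [List.getD, List.getElem?_set_self hk]
        · simp [List.getD, List.getElem?_set_ne (by omega : k ≠ j), hjk]
      rw [hsetD _ _ _ hlen]
      by_cases hji : j = i
      · subst hji
        rw [if_pos rfl, hpadD]
        simp
      · rw [if_neg hji, hpadD]
        rcases lt_or_ge j i with hlt | hge
        · rw [if_neg (by omega : ¬ i ≤ j), if_neg (by omega : ¬ i + 1 ≤ j)]
        · rw [if_pos (by omega : i ≤ j), if_pos (by omega : i + 1 ≤ j),
              show j - i = (j - (i + 1)) + 1 from by omega]
          simp

theorem fts_lines_pos (cw : List Nat) (idx : Nat) (rows : List (List String)) (h : idx ≠ 0) :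
    fts_lines cw idx rows = rows.map (fun r => PySem.Chars.join " | ".toList (fts_rowCells cw 0 r)) := by
  induction rows generalizing idx with
  | nil => simp [fts_lines]
  | cons r rest ih => simp [fts_lines, h, ih (idx + 1) (by omega)]

theorem widths_foldl_length (rows : List (List String)) (ws : List Nat) :
    (rows.foldl (fun ws row => fts_rowWidths ws 0 row) ws).length
      = rows.foldl (fun m r => max m r.length) ws.length := by
  induction rows generalizing ws with
  | nil => simp
  | cons r rest ih =>
      simp only [List.foldl_cons, ih]
      congr 1
      rw [fts_rowWidths_length]
      split <;> simp_all

theorem widths_foldl_getD (rows : List (List String)) (ws : List Nat) (j : Nat) :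
    (rows.foldl (fun ws row => fts_rowWidths ws 0 row) ws).getD j 0
      = rows.foldl (fun m r => max m (PySem.Chars.strip ((r.getD j "").toList)).length) (ws.getD j 0) := by
  induction rows generalizing ws with
  | nil => simp
  | cons r rest ih =>
      simp only [List.foldl_cons, ih]
      congr 1
      rw [fts_rowWidths_getD]
      simp

-- A's capped widths list equals the column-major reference widths
theorem widths_eq (rows : List (List String)) :
    (rows.foldl (fun ws row => fts_rowWidths ws 0 row) []).map (fun w => min w 30) = ftsOld_widths rows := by
  have hlen : (rows.foldl (fun ws row => fts_rowWidths ws 0 row) []).length = ftsB_ncols rows := by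
    simpa [ftsB_ncols] using widths_foldl_length rows []
  apply List.ext_getElem
  · simp [ftsOld_widths, hlen]
  · intro i h1 h2
    have hi : i < (rows.foldl (fun ws row => fts_rowWidths ws 0 row) []).length := by
      simpa using h1
    have hD : (rows.foldl (fun ws row => fts_rowWidths ws 0 row) []).getD i 0 = ftsOld_colMax rows i := by
      simpa [ftsOld_colMax] using widths_foldl_getD rows [] i
    have hE : (rows.foldl (fun ws row => fts_rowWidths ws 0 row) [])[i] = ftsOld_colMax rows i := by
      rw [← hD]; simp [List.getD, List.getElem?_eq_getElem hi]
    simp [ftsOld_widths, hE]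

-- B's capped truncated-length maximum equals A's capped raw-length maximum
theorem min30_fold (rows : List (List String)) (k : Nat) :
    ∀ (a b : Nat), min a 30 = min b 30 →
    min (rows.foldl (fun m r =>
          max m (if k < r.length then ((PySem.Chars.strip ((r.getD k "").toList)).take 30).length else 0)) a) 30
      = min (rows.foldl (fun m r => max m (PySem.Chars.strip ((r.getD k "").toList)).length) b) 30 := by
  induction rows with
  | nil => intro a b h; simpa using h
  | cons r rest ih =>
      intro a b h
      simp only [List.foldl_cons]
      apply ih
      by_cases hk : k < r.length
      · simp only [if_pos hk, List.length_take]; omega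
      · have : (r.getD k "") = "" := by
          simp [List.getD, List.getElem?_eq_none (by omega : r.length ≤ k)]
        simp only [if_neg hk, this,
          show PySem.Chars.strip ("".toList) = [] from rfl]
        simp; omega

-- the width stored for column k by B's column loop
theorem padded_width (rows : List (List String)) (k : Nat) (hk : k < ftsB_ncols rows) :
    ((ftsB_padded rows).getD k (0, [])).1 = (ftsOld_widths rows).getD k 0 := by
  simp only [ftsB_padded, ftsOld_widths, List.getD, List.getElem?_map, List.getElem?_range hk]
  simp only [Option.map_some, Option.getD_some, ftsB_col, List.foldl_map, ftsOld_colMax,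
    apply_ite List.length, List.length_nil]
  exact min30_fold rows k 0 0 rfl

theorem widthsB_eq (rows : List (List String)) :
    (ftsB_padded rows).map Prod.fst = ftsOld_widths rows := by
  apply List.ext_getElem
  · simp [ftsB_padded, ftsOld_widths]
  · intro i h1 h2
    have h1' : i < (ftsB_padded rows).length := by simpa using h1
    have hk : i < ftsB_ncols rows := by simpa [ftsB_padded] using h1'
    have h := padded_width rows i hk
    simp only [List.getD, List.getElem?_eq_getElem h1', List.getElem?_eq_getElem h2,
      Option.getD_some] at h
    simpa using h

-- entry (k, i) of the padded columns, for an in-range cell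
theorem padded_entry (rows : List (List String)) (k i : Nat)
    (hk : k < ftsB_ncols rows) (hi : i < rows.length) (hkr : k < (rows.getD i []).length) :
    ((ftsB_padded rows).getD k (0, [])).2.getD i []
      = pyLjust ((PySem.Chars.strip (((rows.getD i []).getD k "").toList)).take 30)
          ((ftsOld_widths rows).getD k 0) := by
  have hw := padded_width rows k hk
  simp only [ftsB_padded, List.getD, List.getElem?_map, List.getElem?_range hk,
    Option.map_some, Option.getD_some] at hw ⊢
  rw [← hw]
  have hcol : i < (ftsB_col rows k).length := by simpa [ftsB_col] using hi
  simp only [List.getElem?_eq_getElem hcol, Option.map_some, Option.getD_some]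
  congr 1
  simp only [ftsB_col, List.getElem_map]
  rw [if_pos (by simpa [List.getD, List.getElem?_eq_getElem hi] using hkr)]
  simp [List.getD, List.getElem?_eq_getElem hi]

-- A's per-row cells as a map over column indices
theorem fts_rowCells_eq_range (cw : List Nat) (row : List String) :
    ∀ (i : Nat), i + row.length ≤ cw.length →
    fts_rowCells cw i row
      = (List.range row.length).map
          (fun k => pyLjust ((PySem.Chars.strip ((row.getD k "").toList)).take 30) (cw.getD (i + k) 0)) := by
  induction row with
  | nil => intro i _; simp [fts_rowCells]
  | cons c rest ih =>
      intro i h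
      have hi : i < cw.length := by simp at h; omega
      rw [fts_rowCells, if_pos hi, ih (i + 1) (by simp at h ⊢; omega)]
      simp only [List.length_cons, List.range_succ_eq_map, List.map_cons, List.map_map]
      refine congrArg₂ List.cons (by simp) ?_
      apply List.map_congr_left
      intro k _
      simp [Function.comp, show ∀ k, i + 1 + k = i + (k + 1) from fun k => by omega]

theorem line_eq (rows : List (List String)) (i : Nat) (r : List String)
    (hi : i < rows.length) (hr : rows.getD i [] = r) :
    ftsB_line (ftsB_padded rows) i r.length
      = PySem.Chars.join " | ".toList (fts_rowCells (ftsOld_widths rows) 0 r) := by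
  have hle : r.length ≤ ftsB_ncols rows := by
    have hmem : r ∈ rows := by
      rw [← hr]; simp [List.getD, List.getElem?_eq_getElem hi]
    exact (PySem.List.le_foldl_max_nat rows (fun r => r.length) 0).2 r hmem
  rw [ftsB_line, fts_rowCells_eq_range (ftsOld_widths rows) r 0 (by simp [ftsOld_widths]; omega)]
  congr 1
  apply List.map_congr_left
  intro k hk
  have hkr : k < r.length := by simpa using hk
  rw [padded_entry rows k i (by omega) hi (by rw [hr]; exact hkr), hr]
  simp

theorem body_eq (rows : List (List String)) :
    ∀ (rs : List (List String)) (i : Nat),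
    (∀ j, j < rs.length → i + j < rows.length ∧ rows.getD (i + j) [] = rs.getD j []) →
    ftsB_body (ftsB_padded rows) i rs
      = rs.map (fun r => PySem.Chars.join " | ".toList (fts_rowCells (ftsOld_widths rows) 0 r)) := by
  intro rs
  induction rs with
  | nil => intro i _; rfl
  | cons r rest ih =>
      intro i h
      have h0 := h 0 (by simp)
      rw [ftsB_body, List.map_cons]
      congr 1
      · exact line_eq rows i r (by omega) (by simpa using h0.2)
      · apply ih (i + 1)
        intro j hj
        have := h (j + 1) (by simpa using Nat.succ_lt_succ hj)
        constructor
        · omega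
        · simpa [Nat.add_comm, Nat.add_assoc, Nat.add_left_comm] using this.2

-- ===== VERDICT (by name: the statement is the Claim_ definition above) =====
theorem format_table_string_spec : Claim_equal_format_table_string := by
  intro rows _
  show format_table_string rows = format_table_string_alt rows
  cases rows with
  | nil => rfl
  | cons r0 rest =>
    have hA : format_table_string (r0 :: rest)
        = String.ofList (PySem.Chars.join "\n".toList
            (fts_lines (ftsOld_widths (r0 :: rest)) 0 (r0 :: rest))) := by
      rw [format_table_string, if_neg (by simp), widths_eq]
    rw [hA, format_table_string_alt]
    rw [fts_lines, fts_lines_pos _ 1 rest (by omega), if_pos (rfl : (0:Nat) = 0)]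
    simp only [List.singleton_append]
    refine congrArg _ (congrArg _ (congrArg₂ List.cons ?_ (congrArg₂ List.cons ?_ ?_)))
    · exact (line_eq (r0 :: rest) 0 r0 (by simp) rfl).symm
    · rw [widthsB_eq]
    · exact (body_eq (r0 :: rest) rest 1
        (fun j hj => ⟨by simp; omega, by rw [Nat.add_comm]; simp⟩)).symm
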